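-- pv_equiv track=rewrite | github.com/ldayton/Dippy | src/dippy/cli/gh.py | _check_api
-- ===== SOURCE A (Python) =====
-- from typing import Optional
--
-- def _check_api(tokens: list[str]) -> Optional[str]:
--     """Check gh api command - approve GET requests, block mutations."""
--     # tokens: ['gh', 'api', ...]
--     args = tokens[2:] if len(tokens) > 2 else []
--
--     # First pass: determine the method
--     method = None
--     i = 0
--     while i < len(args):
--         arg = args[i]
--         if arg in {"-X", "--method"}:
--             if i + 1 < len(args):
--                 method = args[i + 1].upper()
--             i += 2
--         elif arg.startswith("-X") and len(arg) > 2: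
--             method = arg[2:].upper()
--             i += 1
--         elif arg.startswith("--method="):
--             method = arg[9:].upper()
--             i += 1
--         else:
--             i += 1
--
--     # Explicit non-GET method is unsafe
--     if method is not None and method != "GET":
--         return None
--
--     # Check for graphql queries vs mutations
--     is_graphql_query = False
--     for i, arg in enumerate(args):
--         if arg in {"-f", "--raw-field"} and i + 1 < len(args):
--             val = args[i + 1]
--             if val.startswith("query="):
--                 query_content = val[6:]
--                 if "mutation" in query_content.lower():
--                     return None
--                 is_graphql_query = "query" in query_content.lower() or "{" in query_content
--         if arg.startswith(("--raw-field=query=", "-f=query=")):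
--             query_content = arg.split("=", 2)[2] if arg.count("=") >= 2 else ""
--             if "mutation" in query_content.lower():
--                 return None
--             is_graphql_query = "query" in query_content.lower() or "{" in query_content
--
--     # GraphQL queries (not mutations) are safe
--     if is_graphql_query:
--         return "approve"
--
--     # Check for params that imply POST
--     has_mutation_flags = False
--     for arg in args:
--         if arg in {"-f", "--raw-field", "-F", "--field", "--input"}:
--             has_mutation_flags = True
--             break
--         if arg.startswith(("--raw-field=", "--field=", "--input=")):
--             has_mutation_flags = True
--             break
--
--     # Mutation flags only safe with explicit GET
--     if has_mutation_flags and method != "GET":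
--         return None
--
--     return "approve"
-- ===== SOURCE B (Python) =====
-- def _query_content(args, i, arg):
--     """Return the graphql query payload carried at position i, or None."""
--     if arg.startswith("--raw-field=query="):
--         return arg[18:]
--     if arg.startswith("-f=query="):
--         return arg[9:]
--     if arg in ("-f", "--raw-field") and i + 1 < len(args) and args[i + 1].startswith("query="):
--         return args[i + 1][6:]
--     return None
--
--
-- def _is_mutation_flag(arg):
--     return arg in ("-f", "--raw-field", "-F", "--field", "--input") or arg.startswith(
--         ("--raw-field=", "--field=", "--input=")
--     )
--
--
-- def _check_api(tokens):
--     """Check gh api command - approve GET requests, block mutations.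
--
--     Single pass over the args collecting method / graphql / flag facts,
--     then apply the safety rules once at the end."""
--     args = tokens[2:]
--     method = None
--     skip = False
--     saw_mutation = False
--     graphql_query = False
--     mutation_flags = False
--     for i, arg in enumerate(args):
--         if skip:
--             skip = False
--         elif arg in ("-X", "--method"):
--             if i + 1 < len(args):
--                 method = args[i + 1].upper()
--                 skip = True
--         elif arg.startswith("-X") and len(arg) > 2:
--             method = arg[2:].upper()
--         elif arg.startswith("--method="):
--             method = arg[9:].upper()
--         qc = _query_content(args, i, arg)
--         if qc is not None:
--             if "mutation" in qc.lower():
--                 saw_mutation = True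
--             graphql_query = "query" in qc.lower() or "{" in qc
--         if _is_mutation_flag(arg):
--             mutation_flags = True
--     if method is not None and method != "GET":
--         return None
--     if saw_mutation:
--         return None
--     if graphql_query:
--         return "approve"
--     if mutation_flags and method != "GET":
--         return None
--     return "approve"
-- ===== Notes on version B (the rewrite author's own statement) =====
-- stated objective: alternative
-- what changed: Replaced A's three sequential scans (while-loop method resolution, enumerate graphql scan with early returns, break-loop flag scan) by a single pass that accumulates method/saw_mutation/graphql_query/mutation_flags simultaneously, applying all safety rules once at the end.
import Mathlib
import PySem

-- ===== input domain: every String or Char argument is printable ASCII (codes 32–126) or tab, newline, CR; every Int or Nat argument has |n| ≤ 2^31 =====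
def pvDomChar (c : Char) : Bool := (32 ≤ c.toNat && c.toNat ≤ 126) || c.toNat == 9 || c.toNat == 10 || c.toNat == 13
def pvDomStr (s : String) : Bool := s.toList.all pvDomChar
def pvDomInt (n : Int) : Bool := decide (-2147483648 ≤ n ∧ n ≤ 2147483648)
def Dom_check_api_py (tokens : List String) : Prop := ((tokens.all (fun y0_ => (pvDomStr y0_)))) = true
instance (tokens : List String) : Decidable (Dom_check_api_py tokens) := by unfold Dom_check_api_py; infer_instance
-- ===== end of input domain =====

-- B (a single accumulating pass) replaces A's three sequential scans; same cost, different decomposition.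

-- ===== PORT A =====
-- first pass of A: the while loop resolving `method` (last occurrence wins, -X/--method consume two slots)
def methodLoopA (args : List String) (i : Nat) (method : Option String) : Option String :=
  if h : i < args.length then
    let arg := args[i]
    if arg == "-X" || arg == "--method" then
      if i + 1 < args.length then
        methodLoopA args (i + 2) (some (PySem.Str.upper (args.getD (i + 1) "")))
      else
        methodLoopA args (i + 2) method
    else if PySem.Str.startswith arg "-X" && decide (2 < PySem.Str.len arg) then
      methodLoopA args (i + 1) (some (PySem.Str.upper (PySem.Str.slice arg (some 2) none)))
    else if PySem.Str.startswith arg "--method=" then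
      methodLoopA args (i + 1) (some (PySem.Str.upper (PySem.Str.slice arg (some 9) none)))
    else
      methodLoopA args (i + 1) method
  else method
termination_by args.length - i

-- second pass of A: the `for i, arg in enumerate(args)` graphql scan; result `none` = A's early `return None`,
-- `some b` = loop finished with is_graphql_query = b
def graphqlLoopA (args : List String) (i : Nat) (gq : Bool) : Option Bool :=
  if h : i < args.length then
    let arg := args[i]
    let afterFirst : Option Bool :=
      if (arg == "-f" || arg == "--raw-field") && decide (i + 1 < args.length) then
        let val := args.getD (i + 1) ""
        if PySem.Str.startswith val "query=" then
          let qc := PySem.Str.slice val (some 6) none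
          if PySem.Str.isIn "mutation" (PySem.Str.lower qc) then none
          else some (PySem.Str.isIn "query" (PySem.Str.lower qc) || PySem.Str.isIn "{" qc)
        else some gq
      else some gq
    match afterFirst with
    | none => none
    | some gq1 =>
      if PySem.Str.startswith arg "--raw-field=query=" || PySem.Str.startswith arg "-f=query=" then
        -- arg.split("=", 2)[2]: the [2] index is in range exactly under the count ≥ 2 guard
        let qc := if 2 ≤ PySem.Str.count arg "=" then ((PySem.Str.splitMax? arg "=" 2).getD []).getD 2 "" else ""
        if PySem.Str.isIn "mutation" (PySem.Str.lower qc) then none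
        else graphqlLoopA args (i + 1) (PySem.Str.isIn "query" (PySem.Str.lower qc) || PySem.Str.isIn "{" qc)
      else graphqlLoopA args (i + 1) gq1
  else some gq
termination_by args.length - i

-- third pass of A: `for arg in args` with break
def hasMutFlagsA : List String → Bool
  | [] => false
  | arg :: rest =>
    if arg == "-f" || arg == "--raw-field" || arg == "-F" || arg == "--field" || arg == "--input" then true
    else if PySem.Str.startswith arg "--raw-field=" || PySem.Str.startswith arg "--field=" || PySem.Str.startswith arg "--input=" then true
    else hasMutFlagsA rest

def check_api_py (tokens : List String) : Option String :=
  let args := if 2 < tokens.length then PySem.List.slice tokens (some 2) none else []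
  let method := methodLoopA args 0 none
  if method.isSome && method != some "GET" then none
  else
    match graphqlLoopA args 0 false with
    | none => none
    | some isGraphqlQuery =>
      if isGraphqlQuery then some "approve"
      else if hasMutFlagsA args && method != some "GET" then none
      else some "approve"

-- ===== PORT B =====
-- helper _query_content: the graphql payload carried at position i, if any
def queryContentB (args : List String) (i : Nat) (arg : String) : Option String :=
  if PySem.Str.startswith arg "--raw-field=query=" then some (PySem.Str.slice arg (some 18) none)
  else if PySem.Str.startswith arg "-f=query=" then some (PySem.Str.slice arg (some 9) none)
  else if (arg == "-f" || arg == "--raw-field") && decide (i + 1 < args.length)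
          && PySem.Str.startswith (args.getD (i + 1) "") "query=" then
    some (PySem.Str.slice (args.getD (i + 1) "") (some 6) none)
  else none

-- helper _is_mutation_flag
def isMutationFlagB (arg : String) : Bool :=
  arg == "-f" || arg == "--raw-field" || arg == "-F" || arg == "--field" || arg == "--input"
    || (PySem.Str.startswith arg "--raw-field=" || PySem.Str.startswith arg "--field=" || PySem.Str.startswith arg "--input=")

-- B's single pass: accumulates (method, saw_mutation, graphql_query, mutation_flags) in one loop
def bLoop (args : List String) (i : Nat) (skip : Bool) (method : Option String)
    (sawMut graphqlQuery mutFlags : Bool) : Option String × Bool × Bool × Bool :=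
  if h : i < args.length then
    let arg := args[i]
    let ms : Option String × Bool :=
      if skip then (method, false)
      else if arg == "-X" || arg == "--method" then
        if i + 1 < args.length then (some (PySem.Str.upper (args.getD (i + 1) "")), true)
        else (method, false)
      else if PySem.Str.startswith arg "-X" && decide (2 < PySem.Str.len arg) then
        (some (PySem.Str.upper (PySem.Str.slice arg (some 2) none)), false)
      else if PySem.Str.startswith arg "--method=" then
        (some (PySem.Str.upper (PySem.Str.slice arg (some 9) none)), false)
      else (method, false)
    let smgq : Bool × Bool :=
      match queryContentB args i arg with
      | some qc => (sawMut || PySem.Str.isIn "mutation" (PySem.Str.lower qc),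
                    PySem.Str.isIn "query" (PySem.Str.lower qc) || PySem.Str.isIn "{" qc)
      | none => (sawMut, graphqlQuery)
    bLoop args (i + 1) ms.2 ms.1 smgq.1 smgq.2 (mutFlags || isMutationFlagB arg)
  else (method, sawMut, graphqlQuery, mutFlags)
termination_by args.length - i

def check_api_py_alt (tokens : List String) : Option String :=
  let args := PySem.List.slice tokens (some 2) none
  let st := bLoop args 0 false none false false false
  let method := st.1
  if method.isSome && method != some "GET" then none
  else if st.2.1 then none
  else if st.2.2.1 then some "approve"
  else if st.2.2.2 && method != some "GET" then none
  else some "approve"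

-- ===== PRECONDITION & SPEC =====
def Spec_check_api_py (tokens : List String) (out : Option String) : Prop := out = check_api_py_alt tokens
instance (tokens : List String) (out : Option String) : Decidable (Spec_check_api_py tokens out) := by unfold Spec_check_api_py; infer_instance

-- ===== CLAIM (what is proved, stated in full; the proofs are below) =====
def Claim_equal_check_api_py : Prop := ∀ (tokens : List String), Dom_check_api_py tokens → Spec_check_api_py tokens (check_api_py tokens)

-- ===== LEMMAS AND PROOFS =====

-- PySem-internal stepping lemmas for split/count with separator "=" (used to align A's
-- arg.split("=", 2)[2] with B's fixed-length slice)

theorem go_nonsep (f m : Nat) (hm : m ≠ 0) (c : Char) (l cur : List Char) (acc : List (List Char)) (hc : c ≠ '=') :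
    PySem.Chars.splitOnMax.go ['='] (f+1) m (c::l) cur acc = PySem.Chars.splitOnMax.go ['='] f m l (c::cur) acc := by
  have hc' : ¬ ('=' = c) := fun h => hc h.symm
  rw [PySem.Chars.splitOnMax.go]
  simp [hm, List.isPrefixOf, hc']

theorem go_sep (f m : Nat) (hm : m ≠ 0) (l cur : List Char) (acc : List (List Char)) :
    PySem.Chars.splitOnMax.go ['='] (f+1) m ('='::l) cur acc = PySem.Chars.splitOnMax.go ['='] f (m-1) l [] (cur.reverse :: acc) := by
  rw [PySem.Chars.splitOnMax.go]
  simp [hm, List.isPrefixOf]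

theorem go_zero (f : Nat) (l cur : List Char) (acc : List (List Char)) :
    PySem.Chars.splitOnMax.go ['='] (f+1) 0 l cur acc = ((cur.reverse ++ l) :: acc).reverse := by
  rw [PySem.Chars.splitOnMax.go.eq_def]
  cases l <;> simp

theorem go_prefix (p : List Char) (hp : ∀ c ∈ p, c ≠ '=') (f m : Nat) (hm : m ≠ 0) :
    ∀ (t cur : List Char) (acc : List (List Char)),
    PySem.Chars.splitOnMax.go ['='] (f + p.length) m (p ++ t) cur acc
      = PySem.Chars.splitOnMax.go ['='] f m t (p.reverse ++ cur) acc := by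
  induction p generalizing f with
  | nil => simp
  | cons c p ih =>
    intro t cur acc
    have h1 : f + (c::p).length = (f + p.length) + 1 := by simp [List.length_cons]; omega
    rw [h1, List.cons_append, go_nonsep _ _ hm _ _ _ _ (hp c (by simp))]
    rw [ih (fun x hx => hp x (by simp [hx])) f]
    simp

theorem cgo_nonsep (f : Nat) (c : Char) (l : List Char) (acc : Nat) (hc : c ≠ '=') :
    PySem.Chars.count.go ['='] (f+1) (c::l) acc = PySem.Chars.count.go ['='] f l acc := by
  have hc' : ¬ ('=' = c) := fun h => hc h.symm
  rw [PySem.Chars.count.go]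
  simp [List.isPrefixOf, hc']

theorem cgo_sep (f : Nat) (l : List Char) (acc : Nat) :
    PySem.Chars.count.go ['='] (f+1) ('='::l) acc = PySem.Chars.count.go ['='] f l (acc+1) := by
  rw [PySem.Chars.count.go]
  simp [List.isPrefixOf]

theorem cgo_ge (f : Nat) : ∀ (l : List Char) (acc : Nat), acc ≤ PySem.Chars.count.go ['='] f l acc := by
  induction f with
  | zero => intro l acc; rw [PySem.Chars.count.go.eq_def]
  | succ f ih =>
    intro l acc
    cases l with
    | nil => rw [PySem.Chars.count.go.eq_def]
    | cons c l =>
      by_cases hc : c = '='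
      · subst hc; rw [cgo_sep]; calc acc ≤ acc + 1 := by omega
          _ ≤ _ := ih l (acc+1)
      · rw [cgo_nonsep _ _ _ _ hc]; exact ih l acc

theorem cgo_prefix (p : List Char) (hp : ∀ c ∈ p, c ≠ '=') (f : Nat) :
    ∀ (t : List Char) (acc : Nat),
    PySem.Chars.count.go ['='] (f + p.length) (p ++ t) acc = PySem.Chars.count.go ['='] f t acc := by
  induction p generalizing f with
  | nil => simp
  | cons c p ih =>
    intro t acc
    have h1 : f + (c::p).length = (f + p.length) + 1 := by simp [List.length_cons]; omega
    rw [h1, List.cons_append, cgo_nonsep _ _ _ _ (hp c (by simp))]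
    exact ih (fun x hx => hp x (by simp [hx])) f t acc

def qryC : List Char := ['q','u','e','r','y']

theorem split2_eq (p1 : List Char) (hp1 : ∀ c ∈ p1, c ≠ '=') (t : List Char) :
    PySem.Chars.splitOnMax (p1 ++ '=' :: (qryC ++ '=' :: t)) ['='] 2
      = [p1, qryC, t] := by
  rw [PySem.Chars.splitOnMax]
  rw [if_neg (by norm_num)]
  have hL : (p1 ++ '=' :: (qryC ++ '=' :: t)).length + 1 = ((((t.length + 1) + 1) + 5) + 1) + p1.length := by
    simp [List.length_append, qryC]; omega
  rw [hL]
  rw [show Int.toNat 2 = 2 from rfl]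
  rw [go_prefix p1 hp1 _ 2 (by omega)]
  rw [go_sep _ 2 (by omega)]
  rw [show (2:Nat) - 1 = 1 from rfl]
  have hq : ∀ c ∈ qryC, c ≠ '=' := by intro c hc; fin_cases hc <;> decide
  rw [show (((t.length + 1) + 1) + 5) = ((t.length + 1) + 1) + qryC.length from by simp [qryC]]
  rw [go_prefix _ hq _ 1 (by omega)]
  rw [go_sep _ 1 (by omega)]
  rw [show (1:Nat) - 1 = 0 from rfl]
  rw [go_zero]
  simp

theorem count2_ge (p1 : List Char) (hp1 : ∀ c ∈ p1, c ≠ '=') (t : List Char) :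
    2 ≤ PySem.Chars.count (p1 ++ '=' :: (qryC ++ '=' :: t)) ['='] := by
  rw [PySem.Chars.count]
  rw [if_neg (by simp)]
  have hL : (p1 ++ '=' :: (qryC ++ '=' :: t)).length = (((t.length + 1) + 5) + 1) + p1.length := by
    simp [List.length_append, qryC]; omega
  rw [hL]
  rw [cgo_prefix p1 hp1]
  rw [cgo_sep]
  have hq : ∀ c ∈ qryC, c ≠ '=' := by intro c hc; fin_cases hc <;> decide
  rw [show ((t.length + 1) + 5) = (t.length + 1) + qryC.length from by simp [qryC]]
  rw [cgo_prefix _ hq]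
  rw [cgo_sep]
  exact cgo_ge t.length t 2

def rfC : List Char := ['-','-','r','a','w','-','f','i','e','l','d']
def fC : List Char := ['-','f']

theorem qc_of_prefix (arg : String) (p1 : List Char) (hp1 : ∀ c ∈ p1, c ≠ '=')
    (hd : arg.toList = (p1 ++ '=' :: (qryC ++ ['='])) ++ (arg.toList.drop (p1.length + 7))) :
    2 ≤ PySem.Str.count arg "=" ∧
      ((PySem.Str.splitMax? arg "=" 2).getD []).getD 2 ""
        = PySem.Str.slice arg (some ((p1.length : Int) + 7)) none := by
  set t := arg.toList.drop (p1.length + 7) with htdef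
  have hdec : arg.toList = p1 ++ '=' :: (qryC ++ '=' :: t) := by
    rw [hd]; simp
  constructor
  · rw [PySem.Str.count_eq, show ("=").toList = ['='] from rfl, hdec]
    exact count2_ge p1 hp1 t
  · have hsplit : PySem.Str.splitMax? arg "=" 2
        = some [String.ofList p1, String.ofList qryC, String.ofList t] := by
      rw [PySem.Str.splitMax?]
      rw [show ("=").toList = ['='] from rfl]
      rw [PySem.Chars.splitMax?]
      rw [if_neg (by simp)]
      rw [hdec, split2_eq p1 hp1 t]
      rfl
    rw [hsplit]
    simp only [Option.getD_some, List.getD, List.getElem?_cons_succ, List.getElem?_cons_zero]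
    have hsl : (PySem.Str.slice arg (some ((p1.length : Int) + 7)) none).toList = t := by
      rw [PySem.Str.toList_slice, PySem.Chars.slice_eq_listSlice]
      have hfrom := PySem.List.slice_from arg.toList (a := (p1.length : Int) + 7) (by omega)
      have hnt : ((p1.length : Int) + 7).toNat = p1.length + 7 := by omega
      rw [hfrom, hnt, htdef]
    rw [← hsl, String.ofList_toList]

theorem qc_rfq (arg : String) (h : PySem.Str.startswith arg "--raw-field=query=" = true) :
    2 ≤ PySem.Str.count arg "=" ∧
      ((PySem.Str.splitMax? arg "=" 2).getD []).getD 2 "" = PySem.Str.slice arg (some 18) none := by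
  obtain ⟨t, ht⟩ := (PySem.Chars.startswith_iff _ _).mp (by rw [← PySem.Str.startswith_eq]; exact h)
  have hdrop : arg.toList.drop (rfC.length + 7) = t := by
    rw [← ht, show rfC.length + 7 = ("--raw-field=query=".toList).length from rfl]
    exact List.drop_left
  have hd : arg.toList = (rfC ++ '=' :: (qryC ++ ['='])) ++ arg.toList.drop (rfC.length + 7) := by
    rw [hdrop, ← ht]; rfl
  have hres := qc_of_prefix arg rfC (by intro c hc; fin_cases hc <;> decide) hd
  rwa [show ((rfC.length : Int) + 7) = 18 from by norm_num [rfC]] at hres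

theorem qc_fq (arg : String) (h : PySem.Str.startswith arg "-f=query=" = true) :
    2 ≤ PySem.Str.count arg "=" ∧
      ((PySem.Str.splitMax? arg "=" 2).getD []).getD 2 "" = PySem.Str.slice arg (some 9) none := by
  obtain ⟨t, ht⟩ := (PySem.Chars.startswith_iff _ _).mp (by rw [← PySem.Str.startswith_eq]; exact h)
  have hdrop : arg.toList.drop (fC.length + 7) = t := by
    rw [← ht, show fC.length + 7 = ("-f=query=".toList).length from rfl]
    exact List.drop_left
  have hd : arg.toList = (fC ++ '=' :: (qryC ++ ['='])) ++ arg.toList.drop (fC.length + 7) := by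
    rw [hdrop, ← ht]; rfl
  have hres := qc_of_prefix arg fC (by intro c hc; fin_cases hc <;> decide) hd
  rwa [show ((fC.length : Int) + 7) = 9 from by norm_num [fC]] at hres

theorem flag_excl (arg : String) (h : (arg == "-f" || arg == "--raw-field") = true) :
    PySem.Str.startswith arg "--raw-field=query=" = false ∧ PySem.Str.startswith arg "-f=query=" = false := by
  rcases Bool.or_eq_true_iff.mp h with h | h <;>
    (have he := eq_of_beq h; subst he; exact ⟨by decide, by decide⟩)


-- specification scans used to relate the two ports (proof-only)
def mutFrom (args : List String) (i : Nat) : Bool :=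
  if h : i < args.length then
    (match queryContentB args i args[i] with
     | some qc => PySem.Str.isIn "mutation" (PySem.Str.lower qc)
     | none => false) || mutFrom args (i + 1)
  else false
termination_by args.length - i

def gqFrom (args : List String) (i : Nat) (gq : Bool) : Bool :=
  if h : i < args.length then
    gqFrom args (i + 1)
      (match queryContentB args i args[i] with
       | some qc => PySem.Str.isIn "query" (PySem.Str.lower qc) || PySem.Str.isIn "{" qc
       | none => gq)
  else gq
termination_by args.length - i

theorem methodLoopA_ge (args : List String) (i : Nat) (m : Option String) (h : args.length ≤ i) :
    methodLoopA args i m = m := by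
  unfold methodLoopA
  simp [Nat.not_lt.mpr h]

theorem hasMutFlagsA_cons (a : String) (l : List String) :
    hasMutFlagsA (a :: l) = (isMutationFlagB a || hasMutFlagsA l) := by
  rw [hasMutFlagsA, isMutationFlagB]
  split_ifs with h1 h2 <;> simp_all

theorem bLoop_eq (args : List String) (k : Nat) :
    ∀ (i : Nat), args.length - i ≤ k → ∀ (skip : Bool) (m : Option String) (sm gq hf : Bool),
    bLoop args i skip m sm gq hf =
      (methodLoopA args (if skip then i + 1 else i) m,
       sm || mutFrom args i, gqFrom args i gq, hf || hasMutFlagsA (args.drop i)) := by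
  induction k with
  | zero =>
    intro i hk skip m sm gq hf
    have hge : args.length ≤ i := by omega
    rw [bLoop, mutFrom, gqFrom, dif_neg (by omega), dif_neg (by omega), dif_neg (by omega)]
    rw [List.drop_eq_nil_of_le hge]
    cases skip <;>
      simp [methodLoopA_ge _ _ _ (by omega), methodLoopA_ge _ _ _ (by omega : args.length ≤ i + 1), hasMutFlagsA]
  | succ k ih =>
    intro i hk skip m sm gq hf
    by_cases h : i < args.length
    · rw [bLoop, mutFrom, gqFrom, dif_pos h, dif_pos h, dif_pos h]
      simp only []
      rw [ih (i+1) (by omega)]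
      rw [List.drop_eq_getElem_cons h, hasMutFlagsA_cons]
      simp only [Prod.mk.injEq]
      refine ⟨?_, ?_, ?_, ?_⟩
      · -- method component
        cases skip with
        | true => simp
        | false =>
          conv_rhs => rw [if_neg (by simp), methodLoopA]
          rw [dif_pos h]
          by_cases hx : (args[i] == "-X" || args[i] == "--method") = true
          · rw [if_pos hx, if_pos hx]
            by_cases hn : i + 1 < args.length
            · rw [if_pos hn, if_pos hn]
              simp
            · rw [if_neg hn, if_neg hn]
              have g1 := methodLoopA_ge args (i+1+1) m (by omega)
              have g2 := methodLoopA_ge args (i+1) m (by omega)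
              simp [g1, g2]
          · rw [if_neg hx, if_neg hx]
            by_cases hx2 : (PySem.Str.startswith args[i] "-X" && decide (2 < PySem.Str.len args[i])) = true
            · rw [if_pos hx2, if_pos hx2]
              simp
            · rw [if_neg hx2, if_neg hx2]
              by_cases hx3 : PySem.Str.startswith args[i] "--method=" = true
              · rw [if_pos hx3, if_pos hx3]
                simp
              · rw [if_neg hx3, if_neg hx3]
                simp
      · -- saw_mutation component
        cases hqc : queryContentB args i args[i] <;> simp [Bool.or_assoc]
      · -- graphql_query component
        cases hqc : queryContentB args i args[i] <;> simp
      · -- mutation_flags component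
        simp [Bool.or_assoc]
    · have hge : args.length ≤ i := by omega
      rw [bLoop, mutFrom, gqFrom, dif_neg (by omega), dif_neg (by omega), dif_neg (by omega)]
      rw [List.drop_eq_nil_of_le hge]
      cases skip <;>
        simp [methodLoopA_ge _ _ _ (by omega), methodLoopA_ge _ _ _ (by omega : args.length ≤ i + 1), hasMutFlagsA]

theorem qcB_flag_some (args : List String) (i : Nat) (arg : String)
    (hfl : (arg == "-f" || arg == "--raw-field") = true) (hn : i + 1 < args.length)
    (hq : PySem.Str.startswith (args.getD (i + 1) "") "query=" = true) :
    queryContentB args i arg = some (PySem.Str.slice (args.getD (i + 1) "") (some 6) none) := by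
  obtain ⟨hrf, hfq⟩ := flag_excl _ hfl
  rw [queryContentB, if_neg (by simp only [hrf]; simp), if_neg (by simp only [hfq]; simp),
    if_pos (by simp only [hfl, hq]; simp [hn])]

theorem qcB_flag_none_n (args : List String) (i : Nat) (arg : String)
    (hfl : (arg == "-f" || arg == "--raw-field") = true) (hn : ¬ i + 1 < args.length) :
    queryContentB args i arg = none := by
  obtain ⟨hrf, hfq⟩ := flag_excl _ hfl
  rw [queryContentB, if_neg (by simp only [hrf]; simp), if_neg (by simp only [hfq]; simp),
    if_neg (by simp [hn])]

theorem qcB_flag_none_q (args : List String) (i : Nat) (arg : String)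
    (hfl : (arg == "-f" || arg == "--raw-field") = true)
    (hq : PySem.Str.startswith (args.getD (i + 1) "") "query=" = false) :
    queryContentB args i arg = none := by
  obtain ⟨hrf, hfq⟩ := flag_excl _ hfl
  rw [queryContentB, if_neg (by simp only [hrf]; simp), if_neg (by simp only [hfq]; simp),
    if_neg (by simp only [hq]; simp)]

theorem qcB_rfq (args : List String) (i : Nat) (arg : String)
    (hrf : PySem.Str.startswith arg "--raw-field=query=" = true) :
    queryContentB args i arg = some (PySem.Str.slice arg (some 18) none) := by
  rw [queryContentB, if_pos hrf]

theorem qcB_fq (args : List String) (i : Nat) (arg : String)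
    (hrf : PySem.Str.startswith arg "--raw-field=query=" = false)
    (hfq : PySem.Str.startswith arg "-f=query=" = true) :
    queryContentB args i arg = some (PySem.Str.slice arg (some 9) none) := by
  rw [queryContentB, if_neg (by simp only [hrf]; simp), if_pos hfq]

theorem qcB_none (args : List String) (i : Nat) (arg : String)
    (hfl : (arg == "-f" || arg == "--raw-field") = false)
    (hrf : PySem.Str.startswith arg "--raw-field=query=" = false)
    (hfq : PySem.Str.startswith arg "-f=query=" = false) :
    queryContentB args i arg = none := by
  rw [queryContentB, if_neg (by simp only [hrf]; simp), if_neg (by simp only [hfq]; simp),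
    if_neg (by simp only [hfl]; simp)]

theorem graphqlLoopA_eq (args : List String) (k : Nat) :
    ∀ (i : Nat), args.length - i ≤ k → ∀ (gq : Bool),
    graphqlLoopA args i gq = if mutFrom args i then none else some (gqFrom args i gq) := by
  induction k with
  | zero =>
    intro i hk gq
    rw [graphqlLoopA, mutFrom, gqFrom, dif_neg (by omega), dif_neg (by omega), dif_neg (by omega)]
    simp
  | succ k ih =>
    intro i hk gq
    by_cases h : i < args.length
    · rw [graphqlLoopA, mutFrom, gqFrom, dif_pos h, dif_pos h, dif_pos h]
      simp only []
      by_cases hfl : (args[i] == "-f" || args[i] == "--raw-field") = true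
      · obtain ⟨hrf, hfq⟩ := flag_excl _ hfl
        by_cases hn : i + 1 < args.length
        · by_cases hq : PySem.Str.startswith (args.getD (i + 1) "") "query=" = true
          · rw [if_pos (by simp only [hfl]; simp [hn]), if_pos hq]
            rw [qcB_flag_some args i args[i] hfl hn hq]
            by_cases hmut : PySem.Str.isIn "mutation"
                (PySem.Str.lower (PySem.Str.slice (args.getD (i + 1) "") (some 6) none)) = true
            · have hmut' := hmut
              simp at hmut'
              rw [if_pos hmut]
              simp [hmut']
            · have hmut' := hmut
              simp at hmut'
              rw [if_neg hmut]
              simp only []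
              rw [if_neg (by simp only [hrf, hfq]; simp), ih (i+1) (by omega)]
              simp [hmut']
          · rw [if_pos (by simp only [hfl]; simp [hn]), if_neg hq]
            rw [qcB_flag_none_q args i args[i] hfl (by simpa using hq)]
            simp only []
            rw [if_neg (by simp only [hrf, hfq]; simp), ih (i+1) (by omega)]
            simp
        · rw [if_neg (by simp [hn])]
          rw [qcB_flag_none_n args i args[i] hfl hn]
          simp only []
          rw [if_neg (by simp only [hrf, hfq]; simp), ih (i+1) (by omega)]
          simp
      · have hfl' : (args[i] == "-f" || args[i] == "--raw-field") = false := by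
          simpa using hfl
        rw [if_neg (by simp only [hfl']; simp)]
        simp only []
        by_cases hrf : PySem.Str.startswith args[i] "--raw-field=query=" = true
        · obtain ⟨hc2, hsp⟩ := qc_rfq _ hrf
          rw [if_pos (by simp only [hrf]; simp), if_pos hc2, hsp]
          rw [qcB_rfq args i args[i] hrf]
          by_cases hmut : PySem.Str.isIn "mutation"
              (PySem.Str.lower (PySem.Str.slice args[i] (some 18) none)) = true
          · have hmut' := hmut
            simp at hmut'
            rw [if_pos hmut]
            simp [hmut']
          · have hmut' := hmut
            simp at hmut'
            rw [if_neg hmut, ih (i+1) (by omega)]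
            simp [hmut']
        · have hrf' : PySem.Str.startswith args[i] "--raw-field=query=" = false := by
            simpa using hrf
          by_cases hfq : PySem.Str.startswith args[i] "-f=query=" = true
          · obtain ⟨hc2, hsp⟩ := qc_fq _ hfq
            rw [if_pos (by simp only [hfq]; simp), if_pos hc2, hsp]
            rw [qcB_fq args i args[i] hrf' hfq]
            by_cases hmut : PySem.Str.isIn "mutation"
                (PySem.Str.lower (PySem.Str.slice args[i] (some 9) none)) = true
            · have hmut' := hmut
              simp at hmut'
              rw [if_pos hmut]
              simp [hmut']
            · have hmut' := hmut
              simp at hmut'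
              rw [if_neg hmut, ih (i+1) (by omega)]
              simp [hmut']
          · have hfq' : PySem.Str.startswith args[i] "-f=query=" = false := by
              simpa using hfq
            rw [if_neg (by simp only [hrf', hfq']; simp)]
            rw [qcB_none args i args[i] hfl' hrf' hfq']
            rw [ih (i+1) (by omega)]
            simp
    · rw [graphqlLoopA, mutFrom, gqFrom, dif_neg (by omega), dif_neg (by omega), dif_neg (by omega)]
      simp

-- ===== VERDICT (by name: the statement is the Claim_ definition above) =====
theorem check_api_py_spec : Claim_equal_check_api_py := by
  intro tokens _
  show check_api_py tokens = check_api_py_alt tokens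
  rw [check_api_py, check_api_py_alt]
  have hargs : (if 2 < tokens.length then PySem.List.slice tokens (some 2) none else [])
      = PySem.List.slice tokens (some 2) none := by
    split_ifs with h2
    · rfl
    · rw [PySem.List.slice_from tokens (a := (2:Int)) (by omega)]
      exact (List.drop_eq_nil_of_le (by simpa using h2)).symm
  rw [hargs]
  rw [bLoop_eq (PySem.List.slice tokens (some 2) none) (PySem.List.slice tokens (some 2) none).length 0 (by omega)]
  rw [graphqlLoopA_eq (PySem.List.slice tokens (some 2) none) (PySem.List.slice tokens (some 2) none).length 0 (by omega)]
  by_cases hm1 : ((methodLoopA (PySem.List.slice tokens (some 2) none) 0 none).isSome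
      && (methodLoopA (PySem.List.slice tokens (some 2) none) 0 none != some "GET")) = true
  · simp [hm1]
  · cases hmf : mutFrom (PySem.List.slice tokens (some 2) none) 0 <;>
      cases hgq : gqFrom (PySem.List.slice tokens (some 2) none) 0 false <;>
        simp [hm1, hmf, hgq]
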